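-- pv_equiv track=rewrite | github.com/LeeTheLilBee/SimpleeMrkTrade | engine/market_breadth.py | market_breadth
-- ===== SOURCE A (Python) =====
-- def market_breadth(results):
--     up = sum(1 for r in results if r["trend"] == "UPTREND")
--     down = sum(1 for r in results if r["trend"] == "DOWNTREND")
--
--     if up > down:
--         return "BULLISH"
--     if down > up:
--         return "BEARISH"
--     return "MIXED"
-- ===== SOURCE B (Python) =====
-- def market_breadth(results):
--     net = 0
--     for r in results:
--         t = r["trend"]
--         if t == "UPTREND":
--             net += 1
--         elif t == "DOWNTREND":
--             net -= 1
--     if net > 0: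
--         return "BULLISH"
--     if net < 0:
--         return "BEARISH"
--     return "MIXED"
-- ===== Notes on version B (the rewrite author's own statement) =====
-- stated objective: alternative
-- what changed: Replaces two independent generator-sum tallies (up, down) compared against each other by one pass maintaining a single signed net balance whose sign decides the verdict.
import Mathlib
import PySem

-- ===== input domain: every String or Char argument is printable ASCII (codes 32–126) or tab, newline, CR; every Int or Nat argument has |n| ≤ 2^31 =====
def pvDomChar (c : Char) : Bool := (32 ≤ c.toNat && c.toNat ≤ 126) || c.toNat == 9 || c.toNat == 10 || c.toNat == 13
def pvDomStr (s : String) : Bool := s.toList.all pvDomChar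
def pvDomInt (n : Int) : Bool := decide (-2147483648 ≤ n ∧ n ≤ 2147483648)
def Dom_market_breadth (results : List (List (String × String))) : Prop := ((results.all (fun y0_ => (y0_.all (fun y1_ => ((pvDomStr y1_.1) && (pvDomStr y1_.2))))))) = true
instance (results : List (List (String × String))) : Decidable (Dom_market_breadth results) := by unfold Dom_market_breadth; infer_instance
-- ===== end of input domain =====

-- B replaces A's two independent tallies by one signed net balance; equivalence on inputs where every result has a "trend" key.

-- ===== PORT A =====
-- dict lookup r["trend"]: first match in the association list (Pre_ guarantees the key exists)
def market_breadth (results : List (List (String × String))) : String :=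
  let up : Int := ((results.filter (fun r => List.lookup "trend" r = some "UPTREND")).length : Int)
  let down : Int := ((results.filter (fun r => List.lookup "trend" r = some "DOWNTREND")).length : Int)
  if up > down then "BULLISH"
  else if down > up then "BEARISH"
  else "MIXED"

-- ===== PORT B =====
def market_breadth_alt (results : List (List (String × String))) : String :=
  let net : Int := results.foldl
    (fun net r =>
      let t := List.lookup "trend" r
      if t = some "UPTREND" then net + 1
      else if t = some "DOWNTREND" then net - 1
      else net) 0
  if net > 0 then "BULLISH"
  else if net < 0 then "BEARISH"
  else "MIXED"

-- ===== PRECONDITION & SPEC =====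
-- Pre_ excludes exactly the inputs on which A raises KeyError: some result lacks a "trend" key.
def Pre_market_breadth (results : List (List (String × String))) : Prop :=
  (results.all (fun r => (List.lookup "trend" r).isSome)) = true
instance (results : List (List (String × String))) : Decidable (Pre_market_breadth results) := by
  unfold Pre_market_breadth; infer_instance

def pvWitness_market_breadth : (List (List (String × String))) :=
  [[("trend", "UPTREND")], [("trend", "FLAT")]]

def Spec_market_breadth (results : List (List (String × String))) (out : String) : Prop := out = market_breadth_alt results
instance (results : List (List (String × String))) (out : String) : Decidable (Spec_market_breadth results out) := by unfold Spec_market_breadth; infer_instance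

-- ===== CLAIM (what is proved, stated in full; the proofs are below) =====
def Claim_equal_market_breadth : Prop := ∀ (results : List (List (String × String))), Dom_market_breadth results → Pre_market_breadth results → Spec_market_breadth results (market_breadth results)

-- ===== LEMMAS AND PROOFS =====

theorem mb_net_eq (results : List (List (String × String))) (n : Int) :
    results.foldl
      (fun net r =>
        let t := List.lookup "trend" r
        if t = some "UPTREND" then net + 1
        else if t = some "DOWNTREND" then net - 1
        else net) n
    = n + ((results.filter (fun r => List.lookup "trend" r = some "UPTREND")).length : Int)
        - ((results.filter (fun r => List.lookup "trend" r = some "DOWNTREND")).length : Int) := by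
  induction results generalizing n with
  | nil => simp
  | cons r rs ih =>
    simp only [List.foldl_cons, List.filter_cons]
    rw [ih]
    by_cases h1 : List.lookup "trend" r = some "UPTREND"
    · have h2 : ¬ List.lookup "trend" r = some "DOWNTREND" := by
        rw [h1]; simp
      simp [h1]; ring
    · by_cases h2 : List.lookup "trend" r = some "DOWNTREND"
      · simp [h2]; ring
      · simp [h1, h2]

-- ===== VERDICT (by name: the statement is the Claim_ definition above) =====
theorem market_breadth_spec : Claim_equal_market_breadth := by
  intro results _ _
  unfold Spec_market_breadth market_breadth market_breadth_alt
  rw [mb_net_eq]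
  set u : Int := ((results.filter (fun r => List.lookup "trend" r = some "UPTREND")).length : Int)
  set d : Int := ((results.filter (fun r => List.lookup "trend" r = some "DOWNTREND")).length : Int)
  have : (0 : Int) + u - d = u - d := by ring
  rw [this]
  dsimp only
  split_ifs with h1 h2 h3 h4 h5 <;> first | rfl | omega
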